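-- pv_equiv track=rewrite | github.com/offbynull/offbynull.github.io | docs/data/learn/Algorithms/input/code/src/Stepik.3.3.ExerciseBreak.3RocksGameDynamicAlgorithm.py | rocks
-- ===== SOURCE A (Python) =====
-- def rocks(n, m):
--     R = {}
--     R[0, 0] = 'L'
--     for i in range(1,n):
--         if R[i-1, 0] == 'W':
--             R[i, 0] = 'L'
--         else:
--             R[i, 0] = 'W'
--     for j in range(1,m):
--         if R[0, j-1] == 'W':
--             R[0, j] = 'L'
--         else:
--             R[0, j] = 'W'
--     for i in range(1,n):
--         for j in range(1, m):
--             if R[i-1,j-1] == 'W' and R[i,j-1] == 'W' and R[i-1,j] =='W':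
--                 R[i,j] = 'L'
--             else:
--                 R[i,j] = 'W'
--     return R
-- ===== SOURCE B (Python) =====
-- def rocks(n, m):
--     # Closed form: cell (i, j) is 'L' exactly when both coordinates are even;
--     # no DP table reads are needed.  Keys are emitted in A's insertion order.
--     def v(i, j):
--         return 'L' if i % 2 == 0 and j % 2 == 0 else 'W'
--     cells = [(0, 0)]
--     cells += [(i, 0) for i in range(1, n)]
--     cells += [(0, j) for j in range(1, m)]
--     cells += [(i, j) for i in range(1, n) for j in range(1, m)]
--     return {c: v(*c) for c in cells}
-- ===== Notes on version B (the rewrite author's own statement) =====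
-- stated objective: simpler
-- what changed: Replaces the four-stage DP that derives each cell from three previously stored neighbour cells by a direct enumeration of the same key list with the closed form per cell: 'L' iff both coordinates are even.
import Mathlib
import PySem

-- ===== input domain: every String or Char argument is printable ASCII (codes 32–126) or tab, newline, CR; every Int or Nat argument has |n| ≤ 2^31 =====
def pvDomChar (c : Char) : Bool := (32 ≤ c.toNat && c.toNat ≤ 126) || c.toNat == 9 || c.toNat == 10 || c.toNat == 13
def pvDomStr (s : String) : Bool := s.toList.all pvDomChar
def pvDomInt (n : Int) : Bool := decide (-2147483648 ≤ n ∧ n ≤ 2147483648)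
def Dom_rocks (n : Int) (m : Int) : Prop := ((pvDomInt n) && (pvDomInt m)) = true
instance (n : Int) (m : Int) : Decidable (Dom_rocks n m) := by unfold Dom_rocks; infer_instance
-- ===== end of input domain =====

-- B replaces A's four-stage table (each cell derived from three stored neighbours) by a
-- closed form per cell — 'L' iff both coordinates are even — over the same key order
-- (objective: simpler).

-- ===== PORT A =====
-- Python's R[k] raises KeyError on a missing key; every key A reads was written
-- earlier, so `getD _ ""` is exact here.
def rocks (n : Int) (m : Int) : List (Int × Int × String) :=
  ((PySem.List.pyRange 1 n 1).foldl (fun R i =>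
      (PySem.List.pyRange 1 m 1).foldl (fun R j =>
        if R.getD (i - 1, j - 1) "" == "W" && R.getD (i, j - 1) "" == "W" && R.getD (i - 1, j) "" == "W"
        then R.insert (i, j) "L" else R.insert (i, j) "W") R)
    ((PySem.List.pyRange 1 m 1).foldl (fun R j =>
        if R.getD (0, j - 1) "" == "W" then R.insert (0, j) "L" else R.insert (0, j) "W")
      ((PySem.List.pyRange 1 n 1).foldl (fun R i =>
          if R.getD (i - 1, 0) "" == "W" then R.insert (i, 0) "L" else R.insert (i, 0) "W")
        (PySem.Dict.empty.insert (0, 0) "L")))).items.map (fun p => (p.1.1, p.1.2, p.2))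

-- ===== PORT B =====
def rocksVal (i : Int) (j : Int) : String :=
  if PySem.Int.mod i 2 == 0 && PySem.Int.mod j 2 == 0 then "L" else "W"

def rocks_alt (n : Int) (m : Int) : List (Int × Int × String) :=
  List.map (fun c => (c.1, c.2, rocksVal c.1 c.2))
    ((0, 0) :: ((PySem.List.pyRange 1 n 1).map (fun i => (i, 0))
        ++ (PySem.List.pyRange 1 m 1).map (fun j => ((0 : Int), j)))
      ++ (PySem.List.pyRange 1 n 1).flatMap (fun i =>
        (PySem.List.pyRange 1 m 1).map (fun j => (i, j))))

-- ===== PRECONDITION & SPEC =====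
def Spec_rocks (n : Int) (m : Int) (out : List (Int × Int × String)) : Prop := out = rocks_alt n m
instance (n : Int) (m : Int) (out : List (Int × Int × String)) : Decidable (Spec_rocks n m out) := by unfold Spec_rocks; infer_instance

-- ===== CLAIM (what is proved, stated in full; the proofs are below) =====
def Claim_equal_rocks : Prop := ∀ (n : Int) (m : Int), Dom_rocks n m → Spec_rocks n m (rocks n m)

-- ===== LEMMAS AND PROOFS =====

-- the (key, closed-form value) pair of one cell
def cellv (c : Int × Int) : (Int × Int) × String := (c, rocksVal c.1 c.2)

-- row a, columns 1..j-1
def rowK (a : Int) (j : Int) : List (Int × Int) :=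
  (PySem.List.pyRange 1 j 1).map (fun b => (a, b))

-- key list of A's dict after: the two borders of an n×m grid, full rows 1..i-1, row i up to column j-1
def keys3 (n m i j : Int) : List (Int × Int) :=
  ((0, 0) :: ((PySem.List.pyRange 1 n 1).map (fun a => (a, 0))
    ++ (PySem.List.pyRange 1 m 1).map (fun b => ((0 : Int), b))))
  ++ (PySem.List.pyRange 1 i 1).flatMap (fun a => rowK a m)
  ++ rowK i j

lemma pyRange_one_nil {a b : Int} (h : b ≤ a) : PySem.List.pyRange a b 1 = [] := by
  rw [PySem.List.pyRange_one]
  have : (b - a).toNat = 0 := by omega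
  simp [this]

lemma mem_keys3 {n m i j a b : Int} :
    (a, b) ∈ keys3 n m i j ↔
      (a = 0 ∧ b = 0) ∨ (1 ≤ a ∧ a < n ∧ b = 0) ∨ (a = 0 ∧ 1 ≤ b ∧ b < m) ∨
      (1 ≤ a ∧ a < i ∧ 1 ≤ b ∧ b < m) ∨ (a = i ∧ 1 ≤ b ∧ b < j) := by
  simp only [keys3, rowK, List.mem_append, List.mem_cons, List.mem_map, List.mem_flatMap,
    PySem.List.mem_pyRange_one, Prod.mk.injEq]
  constructor
  · rintro (((h | ⟨x, hx, rfl, rfl⟩ | ⟨x, hx, rfl, rfl⟩) | ⟨x, hx, y, hy, rfl, rfl⟩) |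
      ⟨x, hx, rfl, rfl⟩) <;> omega
  · rintro (⟨rfl, rfl⟩ | ⟨h1, h2, rfl⟩ | ⟨rfl, h1, h2⟩ | ⟨h1, h2, h3, h4⟩ | ⟨rfl, h1, h2⟩)
    · exact Or.inl (Or.inl (Or.inl ⟨rfl, rfl⟩))
    · exact Or.inl (Or.inl (Or.inr (Or.inl ⟨a, ⟨h1, h2⟩, rfl, rfl⟩)))
    · exact Or.inl (Or.inl (Or.inr (Or.inr ⟨b, ⟨h1, h2⟩, rfl, rfl⟩)))
    · exact Or.inl (Or.inr ⟨a, ⟨h1, h2⟩, b, ⟨h3, h4⟩, rfl, rfl⟩)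
    · exact Or.inr ⟨b, ⟨h1, h2⟩, rfl, rfl⟩

lemma nodup_keys3 {n m i j : Int} (hi : 1 ≤ i) : (keys3 n m i j).Nodup := by
  simp only [keys3, rowK, List.nodup_cons, List.nodup_append, List.mem_append, List.mem_map,
    List.mem_flatMap, List.nodup_flatMap, PySem.List.mem_pyRange_one, Prod.mk.injEq]
  refine ⟨⟨⟨?_, ?_, ?_, ?_⟩, ⟨?_, ?_⟩, ?_⟩, ?_, ?_⟩
  · rintro (⟨x, hx, h0, -⟩ | ⟨x, hx, -, h0⟩) <;> omega
  · exact (PySem.List.nodup_pyRange_one 1 n).map (fun x y h => congrArg Prod.fst h)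
  · exact (PySem.List.nodup_pyRange_one 1 m).map (fun x y h => congrArg Prod.snd h)
  · rintro p ⟨x, hx, rfl⟩ q ⟨y, hy, rfl⟩ heq
    simp only [Prod.mk.injEq] at heq
    omega
  · exact fun x _ => (PySem.List.nodup_pyRange_one 1 m).map (fun u v h => congrArg Prod.snd h)
  · refine (PySem.List.pairwise_lt_pyRange_one 1 i).imp ?_
    intro x y hlt p hp hq
    simp only [List.mem_map, PySem.List.mem_pyRange_one] at hp hq
    obtain ⟨u, hu, rfl⟩ := hp
    obtain ⟨v, hv, heq⟩ := hq
    simp only [Prod.mk.injEq] at heq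
    omega
  · intro a ha b hb
    obtain ⟨x, hx, y, hy, rfl⟩ := hb
    simp only [List.mem_cons, List.mem_append, List.mem_map, PySem.List.mem_pyRange_one] at ha
    rcases ha with rfl | ⟨u, hu, rfl⟩ | ⟨u, hu, rfl⟩ <;>
      · intro heq
        simp only [Prod.mk.injEq] at heq
        omega
  · exact (PySem.List.nodup_pyRange_one 1 j).map (fun u v h => congrArg Prod.snd h)
  · intro a ha b hb
    obtain ⟨u, hu, rfl⟩ := hb
    rcases ha with ha | ⟨x, hx, y, hy, rfl⟩
    · simp only [List.mem_cons, List.mem_append, List.mem_map, PySem.List.mem_pyRange_one] at ha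
      rcases ha with rfl | ⟨v, hv, rfl⟩ | ⟨v, hv, rfl⟩ <;>
        · intro heq
          simp only [Prod.mk.injEq] at heq
          omega
    · intro heq
      simp only [Prod.mk.injEq] at heq
      omega

lemma keys_eq_of_items {d : PySem.Dict (Int × Int) String} {n m i j : Int}
    (h : d.items = (keys3 n m i j).map cellv) : d.keys = keys3 n m i j := by
  simp only [PySem.Dict.keys, h, List.map_map]
  calc List.map ((fun x => x.1) ∘ cellv) (keys3 n m i j)
      = List.map id (keys3 n m i j) := List.map_congr_left fun c _ => rfl
    _ = keys3 n m i j := List.map_id _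

lemma getD_grid {d : PySem.Dict (Int × Int) String} {n m i j a b : Int}
    (h : d.items = (keys3 n m i j).map cellv) (hi : 1 ≤ i)
    (hmem : (a, b) ∈ keys3 n m i j) : d.getD (a, b) "" = rocksVal a b := by
  refine PySem.Dict.getD_of_mem_items d ?_ ?_ ""
  · rw [h]
    exact List.mem_map.mpr ⟨(a, b), hmem, rfl⟩
  · rw [keys_eq_of_items h]
    exact nodup_keys3 hi

lemma insert_fresh {d : PySem.Dict (Int × Int) String} {n m i j : Int} {k : Int × Int} (v : String)
    (h : d.items = (keys3 n m i j).map cellv) (hk : k ∉ keys3 n m i j) :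
    (d.insert k v).items = d.items ++ [(k, v)] := by
  refine PySem.Dict.items_insert_of_not_contains d v ?_
  rw [PySem.Dict.contains_eq_decide_mem_keys, keys_eq_of_items h]
  simpa using hk

lemma init_items : (PySem.Dict.empty.insert ((0 : Int), (0 : Int)) "L").items
    = (keys3 1 1 1 1).map cellv := by decide

-- value arithmetic: A's alternating / three-neighbour rules agree with the closed form
lemma rocksVal_step_row (x : Int) :
    (if rocksVal (x - 1) 0 == "W" then "L" else "W") = rocksVal x 0 := by
  simp only [rocksVal, PySem.Int.mod_eq_emod_of_pos (by norm_num : (0:Int) < 2)]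
  rcases Int.emod_two_eq x with h | h <;>
    · have h2 : (x - 1) % 2 = 1 - x % 2 := by omega
      rw [h2, h]; decide

lemma rocksVal_step_col (x : Int) :
    (if rocksVal 0 (x - 1) == "W" then "L" else "W") = rocksVal 0 x := by
  simp only [rocksVal, PySem.Int.mod_eq_emod_of_pos (by norm_num : (0:Int) < 2)]
  rcases Int.emod_two_eq x with h | h <;>
    · have h2 : (x - 1) % 2 = 1 - x % 2 := by omega
      rw [h2, h]; decide

lemma rocksVal_step_inner (i x : Int) :
    (if rocksVal (i - 1) (x - 1) == "W" && rocksVal i (x - 1) == "W" && rocksVal (i - 1) x == "W"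
     then "L" else "W") = rocksVal i x := by
  simp only [rocksVal, PySem.Int.mod_eq_emod_of_pos (by norm_num : (0:Int) < 2)]
  rcases Int.emod_two_eq i with hi | hi <;> rcases Int.emod_two_eq x with hx | hx <;>
    · have h1 : (i - 1) % 2 = 1 - i % 2 := by omega
      have h2 : (x - 1) % 2 = 1 - x % 2 := by omega
      rw [h1, h2, hi, hx]; decide

-- key-list recurrences
lemma keys3_append_row0 {n : Int} (hn : 1 ≤ n) :
    keys3 (n + 1) 1 1 1 = keys3 n 1 1 1 ++ [(n, 0)] := by
  simp [keys3, rowK, PySem.List.pyRange_one_succ_right hn, pyRange_one_nil (le_refl (1:Int))]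

lemma keys3_append_col {n x : Int} (hx : 1 ≤ x) :
    keys3 n (x + 1) 1 1 = keys3 n x 1 1 ++ [(0, x)] := by
  simp [keys3, rowK, PySem.List.pyRange_one_succ_right hx, pyRange_one_nil (le_refl (1:Int))]

lemma keys3_append_row {n m i x : Int} (hx : 1 ≤ x) :
    keys3 n m i (x + 1) = keys3 n m i x ++ [(i, x)] := by
  simp [keys3, rowK, PySem.List.pyRange_one_succ_right hx, List.map_append, List.append_assoc]

lemma keys3_next_row {n m i : Int} (hi : 1 ≤ i) :
    keys3 n m (i + 1) 1 = keys3 n m i m := by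
  simp [keys3, rowK, PySem.List.pyRange_one_succ_right hi, List.flatMap_append,
    pyRange_one_nil (le_refl (1:Int))]

-- one step of each of A's loops, on a dict in the invariant shape
lemma stage1_step {x : Int} (hx : 1 ≤ x) (d : PySem.Dict (Int × Int) String)
    (hd : d.items = (keys3 x 1 1 1).map cellv) :
    (if d.getD (x - 1, 0) "" == "W" then d.insert (x, 0) "L" else d.insert (x, 0) "W").items
      = (keys3 (x + 1) 1 1 1).map cellv := by
  rw [getD_grid hd le_rfl (mem_keys3.mpr (by omega))]
  have hv := rocksVal_step_row x
  split_ifs with h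
  · rw [if_pos h] at hv
    rw [insert_fresh _ hd (fun hmem => by have := mem_keys3.mp hmem; omega), hd,
      keys3_append_row0 hx, List.map_append]
    simp [cellv, ← hv]
  · rw [if_neg h] at hv
    rw [insert_fresh _ hd (fun hmem => by have := mem_keys3.mp hmem; omega), hd,
      keys3_append_row0 hx, List.map_append]
    simp [cellv, ← hv]

lemma stage2_step {n x : Int} (hx : 1 ≤ x) (d : PySem.Dict (Int × Int) String)
    (hd : d.items = (keys3 n x 1 1).map cellv) :
    (if d.getD (0, x - 1) "" == "W" then d.insert (0, x) "L" else d.insert (0, x) "W").items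
      = (keys3 n (x + 1) 1 1).map cellv := by
  rw [getD_grid hd le_rfl (mem_keys3.mpr (by omega))]
  have hv := rocksVal_step_col x
  split_ifs with h
  · rw [if_pos h] at hv
    rw [insert_fresh _ hd (fun hmem => by have := mem_keys3.mp hmem; omega), hd,
      keys3_append_col hx, List.map_append]
    simp [cellv, ← hv]
  · rw [if_neg h] at hv
    rw [insert_fresh _ hd (fun hmem => by have := mem_keys3.mp hmem; omega), hd,
      keys3_append_col hx, List.map_append]
    simp [cellv, ← hv]

lemma stage3row_step {n m i x : Int} (h1 : 1 ≤ i) (hn : i < n) (hx : 1 ≤ x) (hxm : x < m)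
    (d : PySem.Dict (Int × Int) String) (hd : d.items = (keys3 n m i x).map cellv) :
    (if d.getD (i - 1, x - 1) "" == "W" && d.getD (i, x - 1) "" == "W" && d.getD (i - 1, x) "" == "W"
       then d.insert (i, x) "L" else d.insert (i, x) "W").items
      = (keys3 n m i (x + 1)).map cellv := by
  rw [getD_grid hd h1 (mem_keys3.mpr (by omega)),
    getD_grid hd h1 (mem_keys3.mpr (by omega)),
    getD_grid hd h1 (mem_keys3.mpr (by omega))]
  have hv := rocksVal_step_inner i x
  split_ifs with h
  · rw [if_pos h] at hv
    rw [insert_fresh _ hd (fun hmem => by have := mem_keys3.mp hmem; omega), hd,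
      keys3_append_row hx, List.map_append]
    simp [cellv, ← hv]
  · rw [if_neg h] at hv
    rw [insert_fresh _ hd (fun hmem => by have := mem_keys3.mp hmem; omega), hd,
      keys3_append_row hx, List.map_append]
    simp [cellv, ← hv]

-- stage 1: the first border loop
lemma stage1 (t : Int) :
    ((PySem.List.pyRange 1 t 1).foldl (fun R i =>
        if R.getD (i - 1, 0) "" == "W" then R.insert (i, 0) "L" else R.insert (i, 0) "W")
      (PySem.Dict.empty.insert (0, 0) "L")).items = (keys3 t 1 1 1).map cellv := by
  suffices H : ∀ k : Nat, ((PySem.List.pyRange 1 (1 + (k : Int)) 1).foldl (fun R i =>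
      if R.getD (i - 1, 0) "" == "W" then R.insert (i, 0) "L" else R.insert (i, 0) "W")
      (PySem.Dict.empty.insert (0, 0) "L")).items = (keys3 (1 + (k : Int)) 1 1 1).map cellv by
    by_cases ht : t ≤ 1
    · rw [pyRange_one_nil ht, List.foldl_nil, init_items]
      congr 1
      simp [keys3, rowK, pyRange_one_nil ht, pyRange_one_nil (le_refl (1:Int))]
    · have h : t = 1 + ((t - 1).toNat : Int) := by omega
      rw [h]; exact H _
  intro k
  induction k with
  | zero =>
    rw [show (1 + ((0 : Nat) : Int)) = 1 by norm_num, pyRange_one_nil (le_refl (1:Int)),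
      List.foldl_nil, init_items]
  | succ k ih =>
    rw [show (1 + ((k + 1 : Nat) : Int)) = (1 + (k : Int)) + 1 by push_cast; ring,
      PySem.List.pyRange_one_succ_right (by omega), List.foldl_append, List.foldl_cons,
      List.foldl_nil]
    exact stage1_step (by omega) _ ih

-- stage 2: the second border loop
lemma stage2 (n : Int) (d : PySem.Dict (Int × Int) String)
    (hd : d.items = (keys3 n 1 1 1).map cellv) (t : Int) :
    ((PySem.List.pyRange 1 t 1).foldl (fun R j =>
        if R.getD (0, j - 1) "" == "W" then R.insert (0, j) "L" else R.insert (0, j) "W")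
      d).items = (keys3 n t 1 1).map cellv := by
  suffices H : ∀ k : Nat, ((PySem.List.pyRange 1 (1 + (k : Int)) 1).foldl (fun R j =>
      if R.getD (0, j - 1) "" == "W" then R.insert (0, j) "L" else R.insert (0, j) "W")
      d).items = (keys3 n (1 + (k : Int)) 1 1).map cellv by
    by_cases ht : t ≤ 1
    · rw [pyRange_one_nil ht, List.foldl_nil, hd]
      congr 1
      simp [keys3, rowK, pyRange_one_nil ht, pyRange_one_nil (le_refl (1:Int))]
    · have h : t = 1 + ((t - 1).toNat : Int) := by omega
      rw [h]; exact H _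
  intro k
  induction k with
  | zero =>
    rw [show (1 + ((0 : Nat) : Int)) = 1 by norm_num, pyRange_one_nil (le_refl (1:Int)),
      List.foldl_nil, hd]
  | succ k ih =>
    rw [show (1 + ((k + 1 : Nat) : Int)) = (1 + (k : Int)) + 1 by push_cast; ring,
      PySem.List.pyRange_one_succ_right (by omega), List.foldl_append, List.foldl_cons,
      List.foldl_nil]
    exact stage2_step (by omega) _ ih

-- stage 3 inner loop: one row
lemma stage3row (n m i : Int) (h1 : 1 ≤ i) (hn : i < n)
    (d : PySem.Dict (Int × Int) String) (hd : d.items = (keys3 n m i 1).map cellv)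
    (t : Int) (ht : t ≤ m) :
    ((PySem.List.pyRange 1 t 1).foldl (fun R j =>
        if R.getD (i - 1, j - 1) "" == "W" && R.getD (i, j - 1) "" == "W" && R.getD (i - 1, j) "" == "W"
        then R.insert (i, j) "L" else R.insert (i, j) "W") d).items
      = (keys3 n m i t).map cellv := by
  suffices H : ∀ k : Nat, 1 + (k : Int) ≤ m → ((PySem.List.pyRange 1 (1 + (k : Int)) 1).foldl (fun R j =>
      if R.getD (i - 1, j - 1) "" == "W" && R.getD (i, j - 1) "" == "W" && R.getD (i - 1, j) "" == "W"
      then R.insert (i, j) "L" else R.insert (i, j) "W") d).items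
      = (keys3 n m i (1 + (k : Int))).map cellv by
    by_cases ht1 : t ≤ 1
    · rw [pyRange_one_nil ht1, List.foldl_nil, hd]
      congr 1
      simp [keys3, rowK, pyRange_one_nil ht1, pyRange_one_nil (le_refl (1:Int))]
    · have h : t = 1 + ((t - 1).toNat : Int) := by omega
      rw [h] at ht ⊢
      exact H _ ht
  intro k
  induction k with
  | zero =>
    intro _
    rw [show (1 + ((0 : Nat) : Int)) = 1 by norm_num, pyRange_one_nil (le_refl (1:Int)),
      List.foldl_nil, hd]
  | succ k ih =>
    intro hk
    rw [show (1 + ((k + 1 : Nat) : Int)) = (1 + (k : Int)) + 1 by push_cast; ring,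
      PySem.List.pyRange_one_succ_right (by omega), List.foldl_append, List.foldl_cons,
      List.foldl_nil]
    exact stage3row_step h1 hn (by omega) (by push_cast at hk ⊢; omega) _ (ih (by omega))

-- stage 3 outer loop
lemma stage3 (n m : Int) (d : PySem.Dict (Int × Int) String)
    (hd : d.items = (keys3 n m 1 1).map cellv) (t : Int) (ht : t ≤ n) :
    ((PySem.List.pyRange 1 t 1).foldl (fun R i =>
      (PySem.List.pyRange 1 m 1).foldl (fun R j =>
        if R.getD (i - 1, j - 1) "" == "W" && R.getD (i, j - 1) "" == "W" && R.getD (i - 1, j) "" == "W"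
        then R.insert (i, j) "L" else R.insert (i, j) "W") R) d).items
      = (keys3 n m t 1).map cellv := by
  suffices H : ∀ k : Nat, 1 + (k : Int) ≤ n → ((PySem.List.pyRange 1 (1 + (k : Int)) 1).foldl (fun R i =>
      (PySem.List.pyRange 1 m 1).foldl (fun R j =>
        if R.getD (i - 1, j - 1) "" == "W" && R.getD (i, j - 1) "" == "W" && R.getD (i - 1, j) "" == "W"
        then R.insert (i, j) "L" else R.insert (i, j) "W") R) d).items
      = (keys3 n m (1 + (k : Int)) 1).map cellv by
    by_cases ht1 : t ≤ 1
    · rw [pyRange_one_nil ht1, List.foldl_nil, hd]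
      congr 1
      simp [keys3, rowK, pyRange_one_nil ht1, pyRange_one_nil (le_refl (1:Int))]
    · have h : t = 1 + ((t - 1).toNat : Int) := by omega
      rw [h] at ht ⊢
      exact H _ ht
  intro k
  induction k with
  | zero =>
    intro _
    rw [show (1 + ((0 : Nat) : Int)) = 1 by norm_num, pyRange_one_nil (le_refl (1:Int)),
      List.foldl_nil, hd]
  | succ k ih =>
    intro hk
    rw [show (1 + ((k + 1 : Nat) : Int)) = (1 + (k : Int)) + 1 by push_cast; ring,
      PySem.List.pyRange_one_succ_right (by omega), List.foldl_append, List.foldl_cons,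
      List.foldl_nil, keys3_next_row (by omega)]
    exact stage3row n m _ (by omega) (by push_cast at hk ⊢; omega) _ (ih (by omega)) m le_rfl

lemma final_eq (n m : Int) :
    ((keys3 n m n 1).map cellv).map (fun p => (p.1.1, p.1.2, p.2)) = rocks_alt n m := by
  unfold rocks_alt
  rw [List.map_map]
  simp only [keys3, rowK, pyRange_one_nil (le_refl (1:Int)), List.map_nil, List.append_nil]
  all_goals exact List.map_congr_left fun c _ => rfl

-- ===== VERDICT (by name: the statement is the Claim_ definition above) =====
theorem rocks_spec : Claim_equal_rocks := by
  intro n m _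
  show rocks n m = rocks_alt n m
  unfold rocks
  rw [stage3 n m _ (stage2 n _ (stage1 n) m) n le_rfl]
  exact final_eq n m
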